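-- pv_equiv track=rewrite | github.com/Dwij1704/Python | Additional Python Programs/Unit 4 Exam/5. Count all letters, digits, and special symbols from a given string.py | totalcounts
-- ===== SOURCE A (Python) =====
-- def totalcounts(str):
--     alpha=0
--     digit=0
--     special=0
--     for i in str:
--         if i.isalpha():
--             alpha+=1
--         elif i.isdigit():
--             digit+=1
--         else:
--             special+=1
--     return alpha,digit,special
-- ===== SOURCE B (Python) =====
-- def totalcounts(str):
--     alpha = sum(1 for c in str if c.isalpha())
--     digit = sum(1 for c in str if c.isdigit())
--     return alpha, digit, len(str) - alpha - digit
-- ===== Notes on version B (the rewrite author's own statement) =====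
-- stated objective: simpler
-- what changed: Replaces the single three-way elif/else classifying loop by two independent targeted counts (alpha, digit) and derives the special count arithmetically as len(s) - alpha - digit, eliminating the else branch and the mutable accumulators.
import Mathlib
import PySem

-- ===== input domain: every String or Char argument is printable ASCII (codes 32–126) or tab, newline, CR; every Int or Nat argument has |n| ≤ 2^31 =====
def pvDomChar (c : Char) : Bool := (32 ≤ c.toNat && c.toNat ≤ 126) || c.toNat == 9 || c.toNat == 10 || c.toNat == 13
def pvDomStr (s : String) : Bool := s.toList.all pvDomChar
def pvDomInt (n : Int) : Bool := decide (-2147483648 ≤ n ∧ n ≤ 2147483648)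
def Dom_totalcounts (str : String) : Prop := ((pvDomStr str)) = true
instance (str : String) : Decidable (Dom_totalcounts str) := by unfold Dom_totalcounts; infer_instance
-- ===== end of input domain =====

-- B replaces A's single three-way elif/else classifying loop by two targeted counts
-- (alpha, digit) with the special count derived arithmetically as len - alpha - digit (objective: simpler).

-- ===== PORT A =====
def totalcounts (str : String) : Int × Int × Int :=
  let r := str.toList.foldl
    (fun (acc : Int × Int × Int) i =>
      if PySem.Chars.isalpha i then (acc.1 + 1, acc.2.1, acc.2.2)
      else if PySem.Chars.isdigit i then (acc.1, acc.2.1 + 1, acc.2.2)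
      else (acc.1, acc.2.1, acc.2.2 + 1))
    (0, 0, 0)
  r

-- ===== PORT B =====
def totalcounts_alt (str : String) : Int × Int × Int :=
  let alpha : Int := (str.toList.countP (fun c => PySem.Chars.isalpha c) : Int)
  let digit : Int := (str.toList.countP (fun c => PySem.Chars.isdigit c) : Int)
  (alpha, digit, PySem.Str.len str - alpha - digit)

-- ===== PRECONDITION & SPEC =====
def Spec_totalcounts (str : String) (out : Int × Int × Int) : Prop := out = totalcounts_alt str
instance (str : String) (out : Int × Int × Int) : Decidable (Spec_totalcounts str out) := by unfold Spec_totalcounts; infer_instance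

-- ===== CLAIM (what is proved, stated in full; the proofs are below) =====
def Claim_equal_totalcounts : Prop := ∀ (str : String), Dom_totalcounts str → Spec_totalcounts str (totalcounts str)

-- ===== LEMMAS AND PROOFS =====

theorem alpha_digit_disjoint (c : Char) (h : PySem.Chars.isalpha c = true) :
    PySem.Chars.isdigit c = false := by
  simp only [PySem.Chars.isalpha, PySem.Chars.isupper, PySem.Chars.islower,
    PySem.Chars.isdigit, Bool.or_eq_true, Bool.and_eq_true, decide_eq_true_eq,
    Bool.and_eq_false_iff, decide_eq_false_iff_not, not_le,
    Char.le_def, UInt32.le_iff_toNat_le] at *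
  have h0 : '0'.val.toNat = 48 := rfl
  have h9 : '9'.val.toNat = 57 := rfl
  have hA : 'A'.val.toNat = 65 := rfl
  have hZ : 'Z'.val.toNat = 90 := rfl
  have ha : 'a'.val.toNat = 97 := rfl
  have hz : 'z'.val.toNat = 122 := rfl
  omega

theorem totalcounts_loop (l : List Char) (a d sp : Int) :
    l.foldl
      (fun (acc : Int × Int × Int) i =>
        if PySem.Chars.isalpha i then (acc.1 + 1, acc.2.1, acc.2.2)
        else if PySem.Chars.isdigit i then (acc.1, acc.2.1 + 1, acc.2.2)
        else (acc.1, acc.2.1, acc.2.2 + 1))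
      (a, d, sp)
    = (a + (l.countP (fun c => PySem.Chars.isalpha c) : Int),
       d + (l.countP (fun c => PySem.Chars.isdigit c) : Int),
       sp + ((l.length : Int)
              - (l.countP (fun c => PySem.Chars.isalpha c) : Int)
              - (l.countP (fun c => PySem.Chars.isdigit c) : Int))) := by
  induction l generalizing a d sp with
  | nil => simp
  | cons c l ih =>
    by_cases hA : PySem.Chars.isalpha c = true
    · have hD := alpha_digit_disjoint c hA
      simp [hA, hD, ih]
      omega
    · by_cases hD : PySem.Chars.isdigit c = true
      · simp [hA, hD, ih]
        omega
      · simp [hA, hD, ih]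
        omega

-- ===== VERDICT (by name: the statement is the Claim_ definition above) =====
theorem totalcounts_spec : Claim_equal_totalcounts := by
  intro s _
  show totalcounts s = totalcounts_alt s
  simp [totalcounts, totalcounts_alt, totalcounts_loop, PySem.Str.len]
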